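-- pv_equiv track=rewrite | github.com/ErikBongers/mopidy-eboplayer | mopidy_eboplayer/StreamTitleLogger.py | get_active_lines
-- ===== SOURCE A (Python) =====
-- SEPARATOR_LINE = "---"
--
-- def get_active_lines(lines):
--     active_lines = []
--     iterator = lines
--     # ignore the final separator line, if any.
--     if iterator:
--         if iterator[-1] == SEPARATOR_LINE:
--             iterator = lines[:-1]
--
--     for line in reversed(iterator):
--         if line == SEPARATOR_LINE:
--             break
--         active_lines.insert(0, line)
--     return active_lines
-- ===== SOURCE B (Python) =====
-- SEPARATOR_LINE = "---"
--
-- def get_active_lines(lines):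
--     items = lines[:-1] if lines and lines[-1] == SEPARATOR_LINE else lines
--     active = []
--     for line in items:
--         if line == SEPARATOR_LINE:
--             active = []
--         else:
--             active.append(line)
--     return active
-- ===== Notes on version B (the rewrite author's own statement) =====
-- stated objective: simpler
-- what changed: Replaces A's reverse scan with early break and insert-at-front by a single forward pass that resets the accumulator at each separator, keeping the last segment.
import Mathlib
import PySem

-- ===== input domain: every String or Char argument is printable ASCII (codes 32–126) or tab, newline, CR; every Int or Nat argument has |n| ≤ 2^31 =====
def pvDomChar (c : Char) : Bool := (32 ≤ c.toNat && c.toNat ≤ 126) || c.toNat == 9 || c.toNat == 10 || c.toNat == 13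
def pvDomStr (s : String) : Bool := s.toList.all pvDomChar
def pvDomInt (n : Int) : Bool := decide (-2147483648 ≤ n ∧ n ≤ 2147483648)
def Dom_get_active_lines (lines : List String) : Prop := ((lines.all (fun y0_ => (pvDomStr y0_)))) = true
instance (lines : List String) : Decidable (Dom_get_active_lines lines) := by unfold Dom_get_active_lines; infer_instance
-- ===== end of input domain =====

-- B replaces A's reverse scan with break and insert-at-front by one forward pass resetting on each separator (objective: simpler).
-- ===== PORT A =====
-- loop 'for line in reversed(iterator): if line == SEP: break; active_lines.insert(0, line)'
def pvALoop : List String → List String → List String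
  | [], acc => acc
  | x :: xs, acc => if x = "---" then acc else pvALoop xs (x :: acc)

def get_active_lines (lines : List String) : List String :=
  let iterator :=
    if lines ≠ [] then
      if lines.getLast? = some "---" then lines.dropLast else lines
    else lines
  pvALoop iterator.reverse []

-- ===== PORT B =====
def pvBStep (acc : List String) (line : String) : List String :=
  if line = "---" then [] else acc ++ [line]

def get_active_lines_alt (lines : List String) : List String :=
  let items :=
    if lines ≠ [] then
      if lines.getLast? = some "---" then lines.dropLast else lines
    else lines
  items.foldl pvBStep []

-- ===== PRECONDITION & SPEC =====
def Spec_get_active_lines (lines : List String) (out : List String) : Prop := out = get_active_lines_alt lines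
instance (lines : List String) (out : List String) : Decidable (Spec_get_active_lines lines out) := by unfold Spec_get_active_lines; infer_instance

-- ===== CLAIM (what is proved, stated in full; the proofs are below) =====
def Claim_equal_get_active_lines : Prop := ∀ (lines : List String), Dom_get_active_lines lines → Spec_get_active_lines lines (get_active_lines lines)

-- ===== LEMMAS AND PROOFS =====

-- ===== VERDICT (by name: the statement is the Claim_ definition above) =====
theorem pvALoop_acc (l acc : List String) : pvALoop l acc = pvALoop l [] ++ acc := by
  induction l generalizing acc with
  | nil => simp [pvALoop]
  | cons x xs ih =>
    simp only [pvALoop]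
    split
    · simp
    · rw [ih (x :: acc), ih [x]]; simp

theorem pv_main (l : List String) : pvALoop l.reverse [] = l.foldl pvBStep [] := by
  induction l using List.reverseRecOn with
  | nil => simp [pvALoop]
  | append_singleton l x ih =>
    rw [List.reverse_append, List.foldl_append]
    simp only [List.reverse_singleton, List.singleton_append, pvALoop, List.foldl, pvBStep]
    split
    · rfl
    · rw [pvALoop_acc, ih]

theorem get_active_lines_spec : Claim_equal_get_active_lines := by
  intro lines _
  unfold Spec_get_active_lines get_active_lines get_active_lines_alt
  simp only [pv_main]
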